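-- pv_equiv track=rewrite | github.com/georgkislinger/TrakEM2_export | trakEM_exporter_v02.py | build_level_sizes
-- ===== SOURCE A (Python) =====
-- import math
--
-- def build_level_sizes(base_width, base_height, max_m):
--     sizes = []
--     w = int(base_width)
--     h = int(base_height)
--     for level in range(max_m + 1):
--         sizes.append((w, h))
--         if level < max_m:
--             w = max(1, int(math.ceil(w / 2.0)))
--             h = max(1, int(math.ceil(h / 2.0)))
--     return sizes
-- ===== SOURCE B (Python) =====
-- def build_level_sizes(base_width, base_height, max_m):
--     bw = int(base_width)
--     bh = int(base_height)
--     return [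
--         (bw, bh) if level == 0
--         else (max(1, -(-bw >> level)), max(1, -(-bh >> level)))
--         for level in range(max_m + 1)
--     ]
-- ===== Notes on version B (the rewrite author's own statement) =====
-- stated objective: simpler
-- what changed: B drops A's carried w/h accumulator and emits each mipmap level independently in one comprehension, computing level k directly from the base as max(1, ceil(base/2^k)) via an integer shift (level 0 emits the raw base), using that iterated ceiling-halving equals a single ceiling division by 2^k.
import Mathlib
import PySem

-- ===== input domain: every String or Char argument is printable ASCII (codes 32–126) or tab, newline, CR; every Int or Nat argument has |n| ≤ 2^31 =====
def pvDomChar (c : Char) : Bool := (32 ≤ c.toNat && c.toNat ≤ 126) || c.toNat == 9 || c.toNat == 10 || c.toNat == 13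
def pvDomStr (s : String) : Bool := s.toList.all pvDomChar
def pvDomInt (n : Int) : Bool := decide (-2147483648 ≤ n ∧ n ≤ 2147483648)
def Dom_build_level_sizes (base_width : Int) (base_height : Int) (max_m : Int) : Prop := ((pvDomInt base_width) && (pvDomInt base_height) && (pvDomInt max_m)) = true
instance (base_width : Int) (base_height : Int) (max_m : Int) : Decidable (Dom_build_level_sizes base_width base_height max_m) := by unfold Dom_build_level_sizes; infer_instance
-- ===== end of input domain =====

-- B replaces A's level-to-level halving accumulator with a direct per-level closed form
-- (max 1 of a ceiling division of the base by 2^level), for a simpler, stateless comprehension.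


-- ===== PORT A =====
-- `int(math.ceil(w / 2.0))` is ported as the exact ceiling division -((-w) // 2):
-- on the domain (|w| ≤ 2^31) float division by 2.0 is exact, so this is step-for-step faithful.
-- The loop `for level in range(max_m+1)` with the trailing `if level < max_m` update becomes
-- a structural recursion on the number of remaining iterations (k+1 remaining ⇒ level < max_m ↔ 0 < k).
def pvALoop : Nat → Int → Int → List (Int × Int)
  | 0, _, _ => []
  | k+1, w, h =>
      (w, h) ::
        (if 0 < k then
          pvALoop k (max 1 (-(PySem.Int.floordiv (-w) 2))) (max 1 (-(PySem.Int.floordiv (-h) 2)))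
        else
          pvALoop k w h)

def build_level_sizes (base_width : Int) (base_height : Int) (max_m : Int) : List (Int × Int) :=
  pvALoop (max_m + 1).toNat base_width base_height

-- ===== PORT B =====
-- Python's `-(-b >> level)` (arithmetic right shift = floor division by 2^level, exact on all ints)
-- is ported as the corresponding exact ceiling division.
def pvCeilShift (b : Int) (level : Int) : Int :=
  -(PySem.Int.floordiv (-b) (2 ^ level.toNat))

def build_level_sizes_alt (base_width : Int) (base_height : Int) (max_m : Int) : List (Int × Int) :=
  (PySem.List.pyRange 0 (max_m + 1) 1).map (fun level =>
    if level = 0 then (base_width, base_height)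
    else (max 1 (pvCeilShift base_width level), max 1 (pvCeilShift base_height level)))

-- ===== PRECONDITION & SPEC =====
def Spec_build_level_sizes (base_width : Int) (base_height : Int) (max_m : Int) (out : List (Int × Int)) : Prop := out = build_level_sizes_alt base_width base_height max_m
instance (base_width : Int) (base_height : Int) (max_m : Int) (out : List (Int × Int)) : Decidable (Spec_build_level_sizes base_width base_height max_m out) := by unfold Spec_build_level_sizes; infer_instance

-- ===== CLAIM (what is proved, stated in full; the proofs are below) =====
def Claim_equal_build_level_sizes : Prop := ∀ (base_width : Int) (base_height : Int) (max_m : Int), Dom_build_level_sizes base_width base_height max_m → Spec_build_level_sizes base_width base_height max_m (build_level_sizes base_width base_height max_m)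

-- ===== LEMMAS AND PROOFS =====

-- A's per-level update.
def pvStep (w : Int) : Int := max 1 (-(PySem.Int.floordiv (-w) 2))

-- i-fold iterate of A's update (forward recursion, matching the loop).
def pvIter : Nat → Int → Int
  | 0, b => b
  | i+1, b => pvIter i (pvStep b)

lemma pvIter_step (i : Nat) (b : Int) : pvIter i (pvStep b) = pvStep (pvIter i b) := by
  induction i generalizing b with
  | zero => rfl
  | succ i ih => simp [pvIter, ih]

-- A's loop produces exactly the iterates of pvStep.
lemma pvALoop_eq (k : Nat) (w h : Int) :
    pvALoop k w h = (List.range k).map (fun i => (pvIter i w, pvIter i h)) := by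
  induction k generalizing w h with
  | zero => rfl
  | succ k ih =>
    cases k with
    | zero => rfl
    | succ k' =>
      have hstep : pvALoop (k' + 1 + 1) w h =
          (w, h) :: pvALoop (k' + 1) (pvStep w) (pvStep h) := by
        simp [pvALoop, pvStep]
      rw [hstep, ih]
      conv_rhs => rw [List.range_succ_eq_map]
      rw [List.map_cons, List.map_map]
      refine List.cons_eq_cons.mpr ⟨by simp [pvIter], ?_⟩
      apply List.map_congr_left
      intro i _
      simp [Function.comp, pvIter]

-- Key arithmetic: one more max-1 ceiling-halving of a max-1 ceiling division by n (n > 0)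
-- is the max-1 ceiling division by 2n.
lemma pvStep_closed (b n : Int) (hn : 0 < n) :
    pvStep (max 1 (-(PySem.Int.floordiv (-b) n))) = max 1 (-(PySem.Int.floordiv (-b) (2 * n))) := by
  have h2n : 0 < 2 * n := by omega
  have hc := (PySem.Int.neg_floordiv_neg_eq_iff_of_pos (a := b) (b := n) hn
      (q := -(PySem.Int.floordiv (-b) n))).mp rfl
  have hd := (PySem.Int.neg_floordiv_neg_eq_iff_of_pos (a := b) (b := 2 * n) h2n
      (q := -(PySem.Int.floordiv (-b) (2 * n)))).mp rfl
  set c := -(PySem.Int.floordiv (-b) n) with hc_def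
  set d := -(PySem.Int.floordiv (-b) (2 * n)) with hd_def
  obtain ⟨hc1, hc2⟩ := hc
  obtain ⟨hd1, hd2⟩ := hd
  by_cases hcle : c ≤ 1
  · -- low case: both sides are 1
    have hmax : max 1 c = 1 := by omega
    have hble : b ≤ n := le_trans hc2 (by nlinarith)
    have hdle : d ≤ 1 := by nlinarith
    have : pvStep 1 = 1 := by decide
    rw [hmax, this]
    omega
  · -- c ≥ 2: b ≥ n+1 > 0, the ceilings compose
    have hcge : 2 ≤ c := by omega
    have hmax : max 1 c = c := by omega
    rw [hmax]
    have he := (PySem.Int.neg_floordiv_neg_eq_iff_of_pos (a := c) (b := (2:Int)) (by omega)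
        (q := -(PySem.Int.floordiv (-c) 2))).mp rfl
    set e := -(PySem.Int.floordiv (-c) 2) with he_def
    obtain ⟨he1, he2⟩ := he
    have hed : e = d := by
      have : (e - 1) * (2 * n) < b ∧ b ≤ e * (2 * n) := by
        constructor
        · have h1 : (e - 1) * 2 ≤ c - 1 := by omega
          have : (e - 1) * 2 * n ≤ (c - 1) * n := by nlinarith
          nlinarith
        · nlinarith
      have := (PySem.Int.neg_floordiv_neg_eq_iff_of_pos (a := b) (b := 2 * n) h2n (q := e)).mpr this
      omega
    have hbpos : 0 < b := by nlinarith
    have hdpos : 1 ≤ d := by nlinarith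
    have hepos : 1 ≤ e := by omega
    simp only [pvStep, ← he_def]
    omega

-- Closed form for the iterates: for i ≥ 1, pvIter i b = max 1 ⌈b / 2^i⌉.
lemma pvIter_closed (i : Nat) (b : Int) (hi : 1 ≤ i) :
    pvIter i b = max 1 (-(PySem.Int.floordiv (-b) (2 ^ i))) := by
  induction i with
  | zero => omega
  | succ i ih =>
    cases Nat.lt_or_ge i 1 with
    | inl h0 =>
      interval_cases i
      simp [pvIter, pvStep]
    | inr h1 =>
      have : pvIter (i + 1) b = pvStep (pvIter i b) := by
        show pvIter i (pvStep b) = _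
        exact pvIter_step i b
      rw [this, ih h1, pvStep_closed b (2 ^ i) (by positivity)]
      norm_num [pow_succ, mul_comm]

-- ===== VERDICT (by name: the statement is the Claim_ definition above) =====
theorem build_level_sizes_spec : Claim_equal_build_level_sizes := by
  intro bw bh m _
  show build_level_sizes bw bh m = build_level_sizes_alt bw bh m
  unfold build_level_sizes build_level_sizes_alt
  rw [PySem.List.pyRange_one, pvALoop_eq]
  simp only [sub_zero]
  rw [List.map_map]
  apply List.map_congr_left
  intro k _
  simp only [zero_add]
  by_cases hk : k = 0
  · subst hk; simp [pvIter]
  · have hk1 : 1 ≤ k := Nat.one_le_iff_ne_zero.mpr hk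
    rw [pvIter_closed k bw hk1, pvIter_closed k bh hk1]
    simp [hk, pvCeilShift, Int.toNat_natCast]
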